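-- pv_equiv track=rewrite | github.com/LukaszMalucha/Coverage-Vue | app/product_search/utils.py | clean_brand_list
-- ===== SOURCE A (Python) =====
-- def clean_brand_list(lst):
--     """Clean brand names so they can be used for urls"""
--     clean_brands = []
--     for element in lst:
--         new_element = element.lower()
--         new_element = new_element.replace(" ", "-")
--         clean_brands.append(new_element)
--
--     if "not-specified" in clean_brands:
--         clean_brands.remove("not-specified")
--
--     return clean_brands
-- ===== SOURCE B (Python) =====
-- def clean_brand_list(lst):
--     """Clean brand names so they can be used for urls (single pass, skips first 'not-specified')"""
--     result = []
--     removed = False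
--     for element in lst:
--         cleaned = element.lower().replace(" ", "-")
--         if cleaned == "not-specified" and not removed:
--             removed = True
--         else:
--             result.append(cleaned)
--     return result
-- ===== Notes on version B (the rewrite author's own statement) =====
-- stated objective: simpler
-- what changed: A builds the cleaned list in one pass and then scans it again ('in' + list.remove) to delete the first 'not-specified'; B does a single pass with a 'removed' flag that skips only the first cleaned element equal to 'not-specified'.
import Mathlib
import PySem

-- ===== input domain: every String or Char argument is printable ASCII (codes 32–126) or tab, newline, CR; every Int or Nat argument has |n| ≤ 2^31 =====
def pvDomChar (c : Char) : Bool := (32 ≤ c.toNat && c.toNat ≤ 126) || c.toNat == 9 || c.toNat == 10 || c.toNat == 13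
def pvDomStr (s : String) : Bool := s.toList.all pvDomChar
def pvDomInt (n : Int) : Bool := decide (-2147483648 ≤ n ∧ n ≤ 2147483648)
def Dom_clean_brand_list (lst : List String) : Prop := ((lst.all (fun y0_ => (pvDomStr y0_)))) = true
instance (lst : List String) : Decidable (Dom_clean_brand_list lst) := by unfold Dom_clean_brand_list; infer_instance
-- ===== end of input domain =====

-- B replaces A's build-then-scan-and-remove with a single pass keeping a 'removed' flag; return value only.

-- ===== PORT A =====
def clean_brand_list (lst : List String) : List String :=
  let clean_brands := lst.foldl (fun acc element =>
    acc ++ [PySem.Str.replace (PySem.Str.lower element) " " "-"]) []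
  if "not-specified" ∈ clean_brands then
    match PySem.List.remove? clean_brands "not-specified" with
    | some r => r
    | none => clean_brands
  else clean_brands

-- ===== PORT B =====
def clean_brand_list_alt (lst : List String) : List String :=
  (lst.foldl (fun (st : List String × Bool) element =>
      let cleaned := PySem.Str.replace (PySem.Str.lower element) " " "-"
      if cleaned = "not-specified" ∧ st.2 = false then (st.1, true)
      else (st.1 ++ [cleaned], st.2)) ([], false)).1

-- ===== PRECONDITION & SPEC =====
def Spec_clean_brand_list (lst : List String) (out : List String) : Prop := out = clean_brand_list_alt lst
instance (lst : List String) (out : List String) : Decidable (Spec_clean_brand_list lst out) := by unfold Spec_clean_brand_list; infer_instance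

-- ===== CLAIM (what is proved, stated in full; the proofs are below) =====
def Claim_equal_clean_brand_list : Prop := ∀ (lst : List String), Dom_clean_brand_list lst → Spec_clean_brand_list lst (clean_brand_list lst)

-- ===== LEMMAS AND PROOFS =====

def pvClean (element : String) : String :=
  PySem.Str.replace (PySem.Str.lower element) " " "-"

theorem foldl_append_map (lst : List String) (acc : List String) :
    lst.foldl (fun acc element => acc ++ [pvClean element]) acc = acc ++ lst.map pvClean := by
  induction lst generalizing acc with
  | nil => simp
  | cons x xs ih => simp [List.foldl, ih]

theorem altFold_true (lst : List String) (acc : List String) :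
    (lst.foldl (fun (st : List String × Bool) element =>
      if pvClean element = "not-specified" ∧ st.2 = false then (st.1, true)
      else (st.1 ++ [pvClean element], st.2)) (acc, true)).1 = acc ++ lst.map pvClean := by
  induction lst generalizing acc with
  | nil => simp
  | cons x xs ih => simp [List.foldl, ih]

theorem altFold_false (lst : List String) (acc : List String) :
    (lst.foldl (fun (st : List String × Bool) element =>
      if pvClean element = "not-specified" ∧ st.2 = false then (st.1, true)
      else (st.1 ++ [pvClean element], st.2)) (acc, false)).1
      = acc ++ (lst.map pvClean).erase "not-specified" := by
  induction lst generalizing acc with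
  | nil => simp
  | cons x xs ih =>
    by_cases h : pvClean x = "not-specified"
    · simp [List.foldl, h, altFold_true, List.erase_cons_head]
    · have he : (pvClean x :: List.map pvClean xs).erase "not-specified"
          = pvClean x :: (List.map pvClean xs).erase "not-specified" :=
        List.erase_cons_tail (by simp [h])
      simp [List.foldl, h, ih, he]

-- ===== VERDICT (by name: the statement is the Claim_ definition above) =====
theorem clean_brand_list_spec : Claim_equal_clean_brand_list := by
  intro lst _
  show clean_brand_list lst = clean_brand_list_alt lst
  unfold clean_brand_list clean_brand_list_alt
  have hA : lst.foldl (fun acc element =>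
      acc ++ [PySem.Str.replace (PySem.Str.lower element) " " "-"]) [] = lst.map pvClean := by
    simpa [pvClean] using foldl_append_map lst []
  have hB := altFold_false lst []
  simp only [pvClean] at hB
  rw [hA, hB]
  simp only [List.nil_append]
  by_cases hm : "not-specified" ∈ lst.map pvClean
  · rw [if_pos hm, PySem.List.remove?_eq_some_erase _ _ hm]
  · rw [if_neg hm, List.erase_of_not_mem hm]
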